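-- pv_equiv track=rewrite | github.com/aldohindanill-netizen/zephyr_parser | zephyr_weekly_report.py | _common_prefix_tokens
-- ===== SOURCE A (Python) =====
-- def _common_prefix_tokens(token_rows: list[list[str]]) -> list[str]:
--     if not token_rows:
--         return []
--     prefix = list(token_rows[0])
--     for row in token_rows[1:]:
--         limit = min(len(prefix), len(row))
--         i = 0
--         while i < limit and prefix[i].lower() == row[i].lower():
--             i += 1
--         prefix = prefix[:i]
--         if not prefix:
--             break
--     return prefix
-- ===== SOURCE B (Python) =====
-- def _common_prefix_tokens(token_rows: list[list[str]]) -> list[str]: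
--     if not token_rows:
--         return []
--     count = 0
--     for col in zip(*token_rows):
--         first = col[0].lower()
--         if all(t.lower() == first for t in col):
--             count += 1
--         else:
--             break
--     return token_rows[0][:count]
-- ===== Notes on version B (the rewrite author's own statement) =====
-- stated objective: alternative
-- what changed: Replaces A's row-by-row pairwise prefix reduction (inner index while-loop shrinking the prefix per row, with early break) by a single column-major pass over zip(*token_rows) that counts leading columns agreeing case-insensitively, then slices row 0.
import Mathlib
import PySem

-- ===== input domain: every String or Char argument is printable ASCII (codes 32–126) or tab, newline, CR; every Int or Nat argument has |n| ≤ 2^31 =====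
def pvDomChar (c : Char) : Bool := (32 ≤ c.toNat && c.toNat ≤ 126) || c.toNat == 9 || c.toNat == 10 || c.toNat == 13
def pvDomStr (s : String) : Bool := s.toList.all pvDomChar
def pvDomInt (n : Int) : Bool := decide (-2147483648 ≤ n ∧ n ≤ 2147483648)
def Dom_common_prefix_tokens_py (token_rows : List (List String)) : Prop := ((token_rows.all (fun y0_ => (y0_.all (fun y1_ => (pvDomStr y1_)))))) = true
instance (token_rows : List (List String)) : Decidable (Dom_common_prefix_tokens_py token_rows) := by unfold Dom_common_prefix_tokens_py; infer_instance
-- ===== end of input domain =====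

-- B is an alternative decomposition: a single column-major pass over zip(*token_rows)
-- instead of A's row-by-row pairwise prefix reduction; same cost.

-- ===== PORT A =====
-- the inner while loop: i advances while i < limit and prefix[i].lower() == row[i].lower()
-- (getD is exact here: the loop only reads indices i < limit ≤ both lengths)
def cpA_while (pre row : List String) (limit i : Nat) : Nat :=
  if i < limit then
    if PySem.Str.lower (pre.getD i "") == PySem.Str.lower (row.getD i "") then
      cpA_while pre row limit (i + 1)
    else i
  else i
termination_by limit - i

-- the for loop over token_rows[1:], with the 'if not prefix: break'
def cpA_fold (pre : List String) (rows : List (List String)) : List String :=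
  match rows with
  | [] => pre
  | row :: rest =>
    let limit := min pre.length row.length
    let i := cpA_while pre row limit 0
    let pre' := pre.take i
    if pre'.isEmpty then pre' else cpA_fold pre' rest

def common_prefix_tokens_py (token_rows : List (List String)) : List String :=
  match token_rows with
  | [] => []
  | first :: rest => cpA_fold first rest

-- ===== PORT B =====
-- zip(*token_rows): columns while every row still has an element (row 0 passed separately)
def cpB_zip (first : List String) (rest : List (List String)) : List (List String) :=
  match first with
  | [] => []
  | x :: xs =>
    if rest.all (fun r => !r.isEmpty) then
      (x :: rest.map (fun r => r.headD "")) :: cpB_zip xs (rest.map List.tail)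
    else []

-- count leading columns whose tokens all equal the column's first token, case-insensitively
def cpB_count (cols : List (List String)) : Nat :=
  match cols with
  | [] => 0
  | col :: rest =>
    let c0 := PySem.Str.lower (col.headD "")
    if col.all (fun t => PySem.Str.lower t == c0) then 1 + cpB_count rest else 0

def common_prefix_tokens_py_alt (token_rows : List (List String)) : List String :=
  match token_rows with
  | [] => []
  | first :: rest => first.take (cpB_count (cpB_zip first rest))

-- ===== PRECONDITION & SPEC =====
def Spec_common_prefix_tokens_py (token_rows : List (List String)) (out : List String) : Prop := out = common_prefix_tokens_py_alt token_rows
instance (token_rows : List (List String)) (out : List String) : Decidable (Spec_common_prefix_tokens_py token_rows out) := by unfold Spec_common_prefix_tokens_py; infer_instance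

-- ===== CLAIM (what is proved, stated in full; the proofs are below) =====
def Claim_equal_common_prefix_tokens_py : Prop := ∀ (token_rows : List (List String)), Dom_common_prefix_tokens_py token_rows → Spec_common_prefix_tokens_py token_rows (common_prefix_tokens_py token_rows)

-- ===== LEMMAS AND PROOFS =====

-- reference function: joint case-insensitive common-prefix length of `pre` against all `rows`
def lcpAll (pre : List String) (rows : List (List String)) : Nat :=
  match pre with
  | [] => 0
  | p :: ps =>
    if rows.all (fun r => !r.isEmpty && (PySem.Str.lower (r.headD "") == PySem.Str.lower p)) then
      1 + lcpAll ps (rows.map List.tail)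
    else 0

-- pairwise case-insensitive common-prefix length
def lcpLen : List String → List String → Nat
  | p :: ps, r :: rs =>
    if PySem.Str.lower p == PySem.Str.lower r then 1 + lcpLen ps rs else 0
  | _, _ => 0

theorem cpA_while_shift (l i : Nat) (p r : String) (ps rs : List String) :
    cpA_while (p :: ps) (r :: rs) (l + 1) (i + 1) = 1 + cpA_while ps rs l i := by
  have key : ∀ n l i, l - i ≤ n → ∀ (p r : String) (ps rs : List String),
      cpA_while (p :: ps) (r :: rs) (l + 1) (i + 1) = 1 + cpA_while ps rs l i := by
    intro n
    induction n with
    | zero =>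
      intro l i h p r ps rs
      unfold cpA_while
      rw [if_neg (by omega), if_neg (by omega)]
      omega
    | succ n ih =>
      intro l i h p r ps rs
      by_cases hi : i < l
      · conv_lhs => unfold cpA_while
        conv_rhs => unfold cpA_while
        rw [if_pos (by omega : i + 1 < l + 1), if_pos hi]
        simp only [List.getD_cons_succ]
        split
        · exact ih l (i + 1) (by omega) p r ps rs
        · omega
      · unfold cpA_while
        rw [if_neg (by omega), if_neg hi]
        omega
  exact key (l - i) l i le_rfl p r ps rs

theorem cpA_while_eq_lcpLen (pre row : List String) :
    cpA_while pre row (min pre.length row.length) 0 = lcpLen pre row := by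
  induction pre generalizing row with
  | nil => unfold cpA_while lcpLen; simp
  | cons p ps ih =>
    cases row with
    | nil => unfold cpA_while lcpLen; simp
    | cons r rs =>
      have hmin : min (p :: ps).length (r :: rs).length = min ps.length rs.length + 1 := by
        simp [Nat.succ_min_succ]
      rw [hmin]
      conv_lhs => unfold cpA_while
      rw [if_pos (by omega : 0 < min ps.length rs.length + 1)]
      simp only [List.getD_cons_zero]
      unfold lcpLen
      split
      · rw [show (0 : Nat) + 1 = 0 + 1 from rfl, cpA_while_shift, ih rs]
      · rfl

theorem lcpAll_nil (pre : List String) : lcpAll pre [] = pre.length := by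
  induction pre with
  | nil => rfl
  | cons p ps ih => unfold lcpAll; simp only [List.all_nil, if_true, List.map_nil, List.length_cons, ih]; omega

set_option maxHeartbeats 1000000 in
theorem lcpAll_cons (pre : List String) (row : List String) (rest : List (List String)) :
    lcpAll pre (row :: rest) = min (lcpLen pre row) (lcpAll pre rest) := by
  induction pre generalizing row rest with
  | nil => simp [lcpAll]
  | cons p ps ih =>
    cases row with
    | nil => unfold lcpAll lcpLen; simp
    | cons r rs =>
      unfold lcpAll lcpLen
      simp only [List.all_cons, List.map_cons, List.tail_cons, List.isEmpty_cons,
        List.headD_cons, Bool.not_false, Bool.true_and, Bool.and_eq_true]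
      have hsymb : (PySem.Str.lower r == PySem.Str.lower p) = (PySem.Str.lower p == PySem.Str.lower r) := by
        by_cases h : PySem.Str.lower p = PySem.Str.lower r
        · simp [h]
        · have h' : ¬ PySem.Str.lower r = PySem.Str.lower p := fun hh => h hh.symm
          simp [h, h']
      rw [hsymb, ih rs]
      split_ifs <;> first | tauto | simp [Nat.add_min_add_left]

theorem lcpAll_take (i : Nat) (pre : List String) (rest : List (List String)) :
    lcpAll (pre.take i) rest = min i (lcpAll pre rest) := by
  induction pre generalizing i rest with
  | nil => simp [lcpAll]
  | cons p ps ih =>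
    cases i with
    | zero => simp [lcpAll]
    | succ n =>
      simp only [List.take_succ_cons]
      unfold lcpAll
      split
      · rw [ih n]
        omega
      · simp

theorem cpA_fold_cons (pre row : List String) (rest : List (List String)) :
    cpA_fold pre (row :: rest) =
      (if (pre.take (cpA_while pre row (min pre.length row.length) 0)).isEmpty = true
       then pre.take (cpA_while pre row (min pre.length row.length) 0)
       else cpA_fold (pre.take (cpA_while pre row (min pre.length row.length) 0)) rest) := rfl

theorem cpA_fold_eq (rows : List (List String)) (pre : List String) :
    cpA_fold pre rows = pre.take (lcpAll pre rows) := by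
  induction rows generalizing pre with
  | nil => unfold cpA_fold; rw [lcpAll_nil, List.take_length]
  | cons row rest ih =>
    rw [cpA_fold_cons, cpA_while_eq_lcpLen, lcpAll_cons]
    by_cases he : (pre.take (lcpLen pre row)).isEmpty
    · rw [if_pos he]
      have h0 : lcpLen pre row = 0 ∨ pre = [] := by
        rcases List.isEmpty_iff.mp he |> List.take_eq_nil_iff.mp with h | h
        · exact Or.inl h
        · exact Or.inr h
      rcases h0 with h | h
      · rw [h]; simp
      · subst h; simp
    · rw [if_neg he, ih, lcpAll_take, List.take_take]
      congr 1
      omega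

theorem all_bool_and {α : Type} (l : List α) (p q : α → Bool) :
    (l.all fun r => p r && q r) = (l.all p && l.all q) := by
  induction l with
  | nil => rfl
  | cons a t ih =>
    simp only [List.all_cons, ih]
    cases p a <;> cases q a <;> cases t.all p <;> cases t.all q <;> rfl

theorem cpB_eq (first : List String) (rest : List (List String)) :
    cpB_count (cpB_zip first rest) = lcpAll first rest := by
  induction first generalizing rest with
  | nil => simp [cpB_zip, cpB_count, lcpAll]
  | cons x xs ih =>
    unfold cpB_zip lcpAll
    rw [all_bool_and]
    by_cases hne : rest.all (fun r => !r.isEmpty)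
    · rw [if_pos hne, hne]
      unfold cpB_count
      simp only [List.headD_cons, List.all_cons, beq_self_eq_true, Bool.true_and,
        List.all_map, Function.comp_def]
      split
      · rw [ih (rest.map List.tail)]
      · rfl
    · rw [if_neg hne]
      rw [show (rest.all fun r => !r.isEmpty) = false from Bool.eq_false_iff.mpr hne]
      simp [cpB_count]

-- ===== VERDICT (by name: the statement is the Claim_ definition above) =====
theorem common_prefix_tokens_py_spec : Claim_equal_common_prefix_tokens_py := by
  intro token_rows _
  unfold Spec_common_prefix_tokens_py
  cases token_rows with
  | nil => rfl
  | cons first rest =>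
    simp only [common_prefix_tokens_py, common_prefix_tokens_py_alt]
    rw [cpA_fold_eq, cpB_eq]
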